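-- pv_equiv track=rewrite | github.com/vinoth2003/Coding | max_guest_on_cruise.py | maximum_guest
-- ===== SOURCE A (Python) =====
-- def maximum_guest(T,E,L):
--     current_guest=0
--     max_guest=0
--
--     for i in range(T):
--         current_guest+=E[i]-L[i]
--         if current_guest>max_guest:
--             max_guest=current_guest
--
--     return max_guest
-- ===== SOURCE B (Python) =====
-- def maximum_guest(T, E, L):
--     # Backward max-plus recurrence: best after index i is the largest sum of a
--     # (possibly empty) block of deltas starting at i; the answer is best at 0.
--     # best = max(0, d_i + best_{i+1}) since max(0, d0, d0+d1, ...) = max(0, d0 + max(0, d1, ...)).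
--     best = 0
--     for i in range(T - 1, -1, -1):
--         best = max(0, E[i] - L[i] + best)
--     return best
-- ===== Notes on version B (the rewrite author's own statement) =====
-- stated objective: alternative
-- what changed: Replaces A's forward two-state loop (running sum plus running max) with a backward single-accumulator max-plus recurrence best = max(0, E[i]-L[i] + best), i.e. a right fold instead of a left scan; correct because max(0, d0, d0+d1, ...) = max(0, d0 + max(0, d1, d1+d2, ...)).
import Mathlib
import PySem

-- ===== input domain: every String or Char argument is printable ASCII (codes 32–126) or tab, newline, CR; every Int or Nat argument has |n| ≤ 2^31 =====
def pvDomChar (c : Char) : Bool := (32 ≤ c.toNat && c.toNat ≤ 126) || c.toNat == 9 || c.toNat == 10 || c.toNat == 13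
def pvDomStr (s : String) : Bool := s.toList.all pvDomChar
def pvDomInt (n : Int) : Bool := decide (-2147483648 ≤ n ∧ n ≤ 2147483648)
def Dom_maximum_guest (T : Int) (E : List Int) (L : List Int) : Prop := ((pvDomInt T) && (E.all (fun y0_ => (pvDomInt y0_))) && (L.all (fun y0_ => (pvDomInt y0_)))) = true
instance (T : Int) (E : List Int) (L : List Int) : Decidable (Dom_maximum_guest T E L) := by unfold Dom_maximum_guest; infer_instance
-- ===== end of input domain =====

-- B replaces A's forward two-state running-max loop by a backward single-accumulator max-plus recurrence (a right fold); alternative decomposition, same cost.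


-- ===== PORT A =====
-- single fused forward loop: current_guest accumulates, max_guest tracks the running max
def maximum_guest (T : Int) (E : List Int) (L : List Int) : Int :=
  ((PySem.List.pyRange 0 T 1).foldl
    (fun (s : Int × Int) i =>
      let c := s.1 + (PySem.List.pyGetD E i 0 - PySem.List.pyGetD L i 0)
      (c, if c > s.2 then c else s.2))
    (0, 0)).2

-- ===== PORT B =====
-- backward loop over range(T-1, -1, -1): best = max(0, E[i]-L[i] + best)
def maximum_guest_alt (T : Int) (E : List Int) (L : List Int) : Int :=
  (PySem.List.pyRange (T - 1) (-1) (-1)).foldl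
    (fun (best : Int) i => max 0 (PySem.List.pyGetD E i 0 - PySem.List.pyGetD L i 0 + best))
    0

-- ===== PRECONDITION & SPEC =====
-- A raises IndexError when 0 < T and T exceeds either list's length; exactly those inputs are excluded.
def Pre_maximum_guest (T : Int) (E : List Int) (L : List Int) : Prop :=
  0 < T → (T ≤ (E.length : Int) ∧ T ≤ (L.length : Int))
instance (T : Int) (E : List Int) (L : List Int) : Decidable (Pre_maximum_guest T E L) := by unfold Pre_maximum_guest; infer_instance
def pvWitness_maximum_guest : Int × List Int × List Int := (3, [2, 1, 0], [0, 1, 1])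

def Spec_maximum_guest (T : Int) (E : List Int) (L : List Int) (out : Int) : Prop := out = maximum_guest_alt T E L
instance (T : Int) (E : List Int) (L : List Int) (out : Int) : Decidable (Spec_maximum_guest T E L out) := by unfold Spec_maximum_guest; infer_instance

-- ===== CLAIM (what is proved, stated in full; the proofs are below) =====
def Claim_equal_maximum_guest : Prop := ∀ (T : Int) (E : List Int) (L : List Int), Dom_maximum_guest T E L → Pre_maximum_guest T E L → Spec_maximum_guest T E L (maximum_guest T E L)

-- ===== LEMMAS AND PROOFS =====

-- B's right-fold value over an index list
def bwd (f : Int → Int) (idxs : List Int) : Int :=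
  idxs.foldr (fun i a => max 0 (f i + a)) 0

theorem bwd_nonneg (f : Int → Int) (idxs : List Int) : 0 ≤ bwd f idxs := by
  cases idxs with
  | nil => simp [bwd]
  | cons i rest => simp [bwd]

-- A's forward loop, with invariant c ≤ m, equals max m (c + bwd f idxs)
theorem loopA_eq_bwd (f : Int → Int) (idxs : List Int) :
    ∀ (c m : Int), c ≤ m →
      (idxs.foldl (fun (s : Int × Int) i =>
          (s.1 + f i, if s.1 + f i > s.2 then s.1 + f i else s.2)) (c, m)).2
        = max m (c + bwd f idxs) := by
  induction idxs with
  | nil => intro c m h; simp [bwd]; omega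
  | cons i rest ih =>
      intro c m h
      simp only [List.foldl_cons]
      by_cases hc : c + f i > m
      · rw [if_pos hc, ih (c + f i) (c + f i) le_rfl]
        have := bwd_nonneg f rest
        simp only [bwd, List.foldr_cons] at this ⊢
        omega
      · rw [if_neg hc, ih (c + f i) m (by omega)]
        have := bwd_nonneg f rest
        simp only [bwd, List.foldr_cons] at this ⊢
        omega

-- ===== VERDICT (by name: the statement is the Claim_ definition above) =====
theorem maximum_guest_spec : Claim_equal_maximum_guest := by
  intro T E L _ _
  unfold Spec_maximum_guest maximum_guest maximum_guest_alt
  rw [loopA_eq_bwd _ _ 0 0 le_rfl]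
  rw [PySem.List.pyRange_neg_one_eq_reverse, List.foldl_reverse]
  have h : ((-1 : Int) + 1) = 0 ∧ (T - 1 + 1 : Int) = T := by constructor <;> ring
  rw [h.1, h.2]
  have := bwd_nonneg (fun i => PySem.List.pyGetD E i 0 - PySem.List.pyGetD L i 0) (PySem.List.pyRange 0 T 1)
  simp only [bwd] at this ⊢
  omega
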